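-- pv_equiv track=rewrite | github.com/BossWT/CUComProg | 09_MoreDC/09_MoreDC_34.py | pattern2
-- ===== SOURCE A (Python) =====
-- def pattern2(nrows, ncols):
--     ans = []
--     for i in range(nrows):
--         c = []
--         num = i + 1
--         for j in range(ncols):
--             c.append(num)
--             num += nrows
--         ans.append(c)
--     return ans
-- ===== SOURCE B (Python) =====
-- def pattern2(nrows, ncols):
--     # A grid with no rows is empty; otherwise build each column as one
--     # contiguous range and transpose the columns with zip.
--     if nrows <= 0:
--         return []
--     cols = [list(range(j * nrows + 1, (j + 1) * nrows + 1)) for j in range(ncols)]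
--     if not cols:
--         return [[] for _ in range(nrows)]
--     return [list(row) for row in zip(*cols)]
-- ===== Notes on version B (the rewrite author's own statement) =====
-- stated objective: alternative
-- what changed: B returns [] immediately when there are no rows, otherwise builds the grid's columns first (each column is one contiguous range j*nrows+1..(j+1)*nrows) and transposes them with zip, instead of A's nested row loops with a running accumulator incremented by nrows.
import Mathlib
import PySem

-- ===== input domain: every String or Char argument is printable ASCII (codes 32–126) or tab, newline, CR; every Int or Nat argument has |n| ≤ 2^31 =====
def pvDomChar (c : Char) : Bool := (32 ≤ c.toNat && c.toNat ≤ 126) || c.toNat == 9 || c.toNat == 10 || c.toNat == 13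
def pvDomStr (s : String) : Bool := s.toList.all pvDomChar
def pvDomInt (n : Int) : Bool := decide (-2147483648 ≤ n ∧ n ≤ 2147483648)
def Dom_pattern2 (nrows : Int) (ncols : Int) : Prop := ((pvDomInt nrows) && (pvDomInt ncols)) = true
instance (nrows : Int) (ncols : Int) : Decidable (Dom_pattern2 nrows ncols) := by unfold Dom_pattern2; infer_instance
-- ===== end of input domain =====

-- B builds the grid's columns as contiguous ranges and transposes them (zip), instead of A's
-- nested row loops with a running accumulator (objective: alternative decomposition, same cost).


-- ===== PORT A =====
def pattern2 (nrows : Int) (ncols : Int) : List (List Int) :=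
  (PySem.List.pyRange 0 nrows 1).foldl
    (fun ans i =>
      let r := (PySem.List.pyRange 0 ncols 1).foldl
        (fun (s : List Int × Int) _j => (s.1 ++ [s.2], s.2 + nrows))
        (([] : List Int), i + 1)
      ans ++ [r.1])
    []

-- ===== PORT B =====
-- zip(*cols): emit the row of heads while every column is nonempty, then recurse on the tails.
-- Fuel = first column's length; zip stops at the shortest column, which the all-nonempty check
-- detects, and the shortest is never longer than the first, so the fuel is exact.
def pvZipStar : Nat → List (List Int) → List (List Int)
  | 0, _ => []
  | n + 1, cols =>
    if cols.all (fun c => !c.isEmpty) then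
      (cols.map (fun c => c.headD 0)) :: pvZipStar n (cols.map List.tail)
    else []

def pattern2_alt (nrows : Int) (ncols : Int) : List (List Int) :=
  if nrows ≤ 0 then []
  else
  let cols := (PySem.List.pyRange 0 ncols 1).map
    (fun j => PySem.List.pyRange (j * nrows + 1) ((j + 1) * nrows + 1) 1)
  if cols = [] then (PySem.List.pyRange 0 nrows 1).map (fun _ => [])
  else pvZipStar (cols.headD []).length cols

-- ===== PRECONDITION & SPEC =====
def Spec_pattern2 (nrows : Int) (ncols : Int) (out : List (List Int)) : Prop := out = pattern2_alt nrows ncols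
instance (nrows : Int) (ncols : Int) (out : List (List Int)) : Decidable (Spec_pattern2 nrows ncols out) := by unfold Spec_pattern2; infer_instance

-- ===== CLAIM (what is proved, stated in full; the proofs are below) =====
def Claim_equal_pattern2 : Prop := ∀ (nrows : Int) (ncols : Int), Dom_pattern2 nrows ncols → Spec_pattern2 nrows ncols (pattern2 nrows ncols)

-- ===== LEMMAS AND PROOFS =====

-- A's inner loop: appending `num` and stepping by `nrows`, over any list of ignored elements.
lemma innerA (nrows : Int) : ∀ (l : List Int) (c : List Int) (num : Int),
    l.foldl (fun (s : List Int × Int) _j => (s.1 ++ [s.2], s.2 + nrows)) (c, num)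
      = (c ++ (List.range l.length).map (fun (k : ℕ) => num + (k : Int) * nrows),
         num + (l.length : Int) * nrows) := by
  intro l
  induction l with
  | nil => intro c num; simp
  | cons a l ih =>
    intro c num
    simp only [List.foldl_cons, ih, List.length_cons]
    refine Prod.ext ?_ (by push_cast; ring)
    show c ++ [num] ++ _ = _
    rw [List.range_succ_eq_map, List.map_cons, List.map_map]
    simp only [Nat.cast_zero, zero_mul, add_zero, List.append_assoc, List.singleton_append]
    congr 2
    exact List.map_congr_left (fun k _ => by simp [Function.comp]; ring)

-- A's outer loop: appending one built row per element is a map.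
lemma foldl_app (g : Int → List Int) : ∀ (l : List Int) (init : List (List Int)),
    l.foldl (fun ans i => ans ++ [g i]) init = init ++ l.map g := by
  intro l
  induction l with
  | nil => intro init; simp
  | cons a l ih => intro init; simp [ih]

-- Transposing columns of uniform length m yields, for each i < m, the row of i-th entries.
lemma zipStar_uniform : ∀ (m : Nat) (cols : List (List Int)), cols ≠ [] →
    (∀ c ∈ cols, c.length = m) →
    pvZipStar m cols = (List.range m).map (fun i => cols.map (fun c => c.getD i 0)) := by
  intro m
  induction m with
  | zero => intro cols _ _; simp [pvZipStar]
  | succ n ih =>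
    intro cols hne hlen
    have hall : cols.all (fun c => !c.isEmpty) = true := by
      rw [List.all_eq_true]
      intro c hc
      have := hlen c hc
      simp only [Bool.not_eq_eq_eq_not, Bool.not_true, List.isEmpty_eq_false_iff]
      intro h; subst h; simp at this
    rw [pvZipStar, if_pos hall,
        ih (cols.map List.tail) (by simpa using hne)
          (by intro c hc
              obtain ⟨d, hd, rfl⟩ := List.mem_map.mp hc
              have := hlen d hd
              simp [List.length_tail, this]),
        List.range_succ_eq_map, List.map_cons, List.map_map]
    congr 1
    · refine List.map_congr_left (fun c hc => ?_)
      have hne' : c ≠ [] := by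
        have := hlen c hc; intro h; simp [h] at this
      cases c with
      | nil => exact absurd rfl hne'
      | cons a t => rfl
    · refine List.map_congr_left (fun i _ => ?_)
      simp only [Function.comp, List.map_map]
      refine List.map_congr_left (fun c hc => ?_)
      cases c with
      | nil => rfl
      | cons a t => rfl

-- ===== VERDICT (by name: the statement is the Claim_ definition above) =====
theorem pattern2_spec : Claim_equal_pattern2 := by
  intro nrows ncols _
  unfold Spec_pattern2 pattern2 pattern2_alt
  rw [foldl_app]
  simp only [List.nil_append]
  by_cases hr : nrows ≤ 0
  · rw [if_pos hr, PySem.List.pyRange_one_eq_nil hr, List.map_nil]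
  rw [if_neg hr]
  by_cases hc : ncols ≤ 0
  · -- no columns: B returns one empty row per element of range(nrows); A builds empty rows.
    rw [PySem.List.pyRange_one_eq_nil hc]
    simp only [List.map_nil, if_pos rfl]
    refine List.map_congr_left (fun i _ => ?_)
    rw [innerA]
    simp
  · push_neg at hc
    have hcols : (PySem.List.pyRange 0 ncols 1).map
        (fun j => PySem.List.pyRange (j * nrows + 1) ((j + 1) * nrows + 1) 1) ≠ [] := by
      simp [PySem.List.pyRange_one_cons (show (0:Int) < ncols from hc)]
    rw [if_neg hcols]
    have hcolLen : ∀ (j : Int),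
        (PySem.List.pyRange (j * nrows + 1) ((j + 1) * nrows + 1) 1).length = nrows.toNat := by
      intro j
      rw [PySem.List.length_pyRange_one]
      congr 1
      ring
    have hhead : ((((PySem.List.pyRange 0 ncols 1).map
        (fun j => PySem.List.pyRange (j * nrows + 1) ((j + 1) * nrows + 1) 1)).headD []).length)
          = nrows.toNat := by
      rw [PySem.List.pyRange_one_cons (show (0:Int) < ncols from hc), List.map_cons, List.headD_cons,
          hcolLen]
    rw [hhead, zipStar_uniform nrows.toNat _ hcols
        (by intro c hcm
            obtain ⟨j, _, rfl⟩ := List.mem_map.mp hcm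
            exact hcolLen j)]
    rw [PySem.List.pyRange_one 0 nrows]
    simp only [Int.sub_zero, List.map_map]
    refine List.map_congr_left (fun i hi => ?_)
    simp only [Function.comp, Int.zero_add]
    have him : i < nrows.toNat := List.mem_range.mp hi
    rw [innerA]
    simp only [List.nil_append, PySem.List.length_pyRange_one, Int.sub_zero, List.map_map]
    rw [PySem.List.pyRange_one 0 ncols]
    simp only [Int.sub_zero, List.map_map]
    refine List.map_congr_left (fun k _ => ?_)
    simp only [Function.comp, Int.zero_add]
    have hget : (PySem.List.pyRange ((k : Int) * nrows + 1) (((k : Int) + 1) * nrows + 1) 1).getD i 0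
        = (k : Int) * nrows + 1 + (i : Int) := by
      rw [List.getD_eq_getElem _ _ (by rw [hcolLen]; exact him),
          PySem.List.getElem_pyRange_one]
    rw [hget]
    ring
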